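-- pv_equiv track=rewrite | github.com/VitoYang1026/Mortgagee-Pricing-Tool | core/structure_checker.py | _check_module_order
-- ===== SOURCE A (Python) =====
-- from typing import Dict, List, Set, Tuple, Any, Optional, Union
--
-- def _check_module_order(sheet_modules: List[str], aaa_modules: List[str]) -> bool:
--     """
--     Check if modules are in the same order as the AAA sheet.
--
--     Args:
--         sheet_modules: List of sheet module names
--         aaa_modules: List of AAA module names
--
--     Returns:
--         True if order is correct, False otherwise
--     """
--     # Create a mapping of module name to position
--     aaa_positions = {module: i for i, module in enumerate(aaa_modules)}
--
--     # Check if sheet modules are in the same order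
--     prev_pos = -1
--     for module in sheet_modules:
--         if module in aaa_positions:
--             pos = aaa_positions[module]
--             if pos < prev_pos:
--                 return False
--             prev_pos = pos
--
--     return True
-- ===== SOURCE B (Python) =====
-- def _check_module_order(sheet_modules, aaa_modules):
--     aaa_positions = {module: i for i, module in enumerate(aaa_modules)}
--     pos_list = [aaa_positions[m] for m in sheet_modules if m in aaa_positions]
--     return pos_list == sorted(pos_list)
-- ===== Notes on version B (the rewrite author's own statement) =====
-- stated objective: idiomatic
-- what changed: Replaces the incremental prev_pos monotonicity scan and early return with materializing the list of AAA positions and comparing it to its sorted version.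
import Mathlib
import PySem

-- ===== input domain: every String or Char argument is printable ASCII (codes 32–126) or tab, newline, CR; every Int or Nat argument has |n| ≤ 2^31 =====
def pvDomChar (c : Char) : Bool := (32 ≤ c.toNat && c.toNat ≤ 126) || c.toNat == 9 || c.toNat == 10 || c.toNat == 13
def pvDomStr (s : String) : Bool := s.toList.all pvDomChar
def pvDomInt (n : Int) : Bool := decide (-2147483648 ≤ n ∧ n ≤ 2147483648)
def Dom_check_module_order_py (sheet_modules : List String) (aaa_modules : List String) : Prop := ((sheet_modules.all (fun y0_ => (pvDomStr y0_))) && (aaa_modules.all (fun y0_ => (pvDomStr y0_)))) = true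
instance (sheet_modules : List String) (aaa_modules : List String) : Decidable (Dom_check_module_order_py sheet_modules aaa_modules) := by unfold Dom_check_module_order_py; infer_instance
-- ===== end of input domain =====

-- B replaces A's incremental prev_pos monotonicity scan by materializing the position list and comparing it to its sorted version (idiomatic; same behaviour).

-- ===== PORT A =====
-- aaa_positions = {module: i for i, module in enumerate(aaa_modules)} (last occurrence wins, as dict insert overwrites)
def aaaPositionsA (aaa_modules : List String) : PySem.Dict String Int :=
  (PySem.List.enumerate aaa_modules).foldl (fun d p => d.insert p.2 p.1) PySem.Dict.empty

-- the for-loop with prev_pos and early 'return False'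
def loopA (ms : List String) (d : PySem.Dict String Int) (prev_pos : Int) : Bool :=
  match ms with
  | [] => true
  | m :: rest =>
    match d.get? m with
    | some pos => if pos < prev_pos then false else loopA rest d pos
    | none => loopA rest d prev_pos

def check_module_order_py (sheet_modules : List String) (aaa_modules : List String) : Bool :=
  loopA sheet_modules (aaaPositionsA aaa_modules) (-1)

-- ===== PORT B =====
def aaaPositionsB (aaa_modules : List String) : PySem.Dict String Int :=
  (PySem.List.enumerate aaa_modules).foldl (fun d p => d.insert p.2 p.1) PySem.Dict.empty

def check_module_order_py_alt (sheet_modules : List String) (aaa_modules : List String) : Bool :=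
  let d := aaaPositionsB aaa_modules
  let pos_list := sheet_modules.filterMap (fun m => d.get? m)
  decide (pos_list = PySem.List.sorted pos_list (fun x => x) false)

-- ===== PRECONDITION & SPEC =====
def Spec_check_module_order_py (sheet_modules : List String) (aaa_modules : List String) (out : Bool) : Prop := out = check_module_order_py_alt sheet_modules aaa_modules
instance (sheet_modules : List String) (aaa_modules : List String) (out : Bool) : Decidable (Spec_check_module_order_py sheet_modules aaa_modules out) := by unfold Spec_check_module_order_py; infer_instance

-- ===== CLAIM (what is proved, stated in full; the proofs are below) =====
def Claim_equal_check_module_order_py : Prop := ∀ (sheet_modules : List String) (aaa_modules : List String), Dom_check_module_order_py sheet_modules aaa_modules → Spec_check_module_order_py sheet_modules aaa_modules (check_module_order_py sheet_modules aaa_modules)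

-- ===== LEMMAS AND PROOFS =====

-- values looked up in the foldl-built dict are nonnegative when all inserted values are
lemma get?_foldl_insert_nonneg (l : List (Int × String)) (d : PySem.Dict String Int)
    (hd : ∀ m v, d.get? m = some v → 0 ≤ v) (hl : ∀ p ∈ l, 0 ≤ p.1)
    (m : String) (v : Int)
    (h : (l.foldl (fun d p => d.insert p.2 p.1) d).get? m = some v) : 0 ≤ v := by
  induction l generalizing d with
  | nil => exact hd m v h
  | cons p rest ih =>
    refine ih (d.insert p.2 p.1) ?_ (fun q hq => hl q (List.mem_cons_of_mem _ hq)) h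
    intro m' v' h'
    rw [PySem.Dict.get?_insert] at h'
    split at h'
    · cases h'; exact hl p (List.mem_cons_self ..)
    · exact hd m' v' h'

lemma aaaPositionsA_nonneg (aaa_modules : List String) (m : String) (v : Int)
    (h : (aaaPositionsA aaa_modules).get? m = some v) : 0 ≤ v := by
  refine get?_foldl_insert_nonneg _ _ ?_ ?_ m v h
  · intro m' v' h'; simp [PySem.Dict.get?_empty] at h'
  · intro p hp
    rw [PySem.List.mem_enumerate_iff] at hp
    obtain ⟨k, hk, rfl⟩ := hp
    simp

-- A's scan succeeds iff prev followed by the looked-up positions is nondecreasing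
lemma loopA_true_iff (ms : List String) (d : PySem.Dict String Int) (prev : Int) :
    loopA ms d prev = true ↔
      List.IsChain (· ≤ ·) (prev :: ms.filterMap (fun m => d.get? m)) := by
  induction ms generalizing prev with
  | nil => simp [loopA]
  | cons m rest ih =>
    simp only [loopA, List.filterMap_cons]
    cases h : d.get? m with
    | none => exact ih prev
    | some pos =>
      by_cases hlt : pos < prev
      · simp only [hlt, if_true]
        constructor
        · intro hfalse; cases hfalse
        · intro hc
          have := (List.isChain_cons_cons.mp hc).1
          omega
      · simp only [hlt, if_false, List.isChain_cons_cons, ih pos]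
        constructor
        · intro hc; exact ⟨not_lt.mp hlt, hc⟩
        · intro hc; exact hc.2

-- a list of nonnegatives is nondecreasing-from-(-1) iff it equals its stable sort
lemma chain_iff_sorted_eq (l : List Int) (hnn : ∀ x ∈ l, 0 ≤ x) :
    List.IsChain (· ≤ ·) ((-1 : Int) :: l) ↔ l = PySem.List.sorted l (fun x => x) false := by
  have hpair : List.IsChain (· ≤ ·) l ↔ l.Pairwise (fun a b : Int => a ≤ b) :=
    List.isChain_iff_pairwise
  constructor
  · intro hc
    have hp : l.Pairwise (fun a b : Int => a ≤ b) := by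
      rcases l with _ | ⟨a, t⟩
      · simp
      · exact hpair.mp (List.isChain_cons_cons.mp hc).2
    exact (PySem.List.sorted_eq_self_of_pairwise l (fun x : Int => x) hp).symm
  · intro he
    have hp : l.Pairwise (fun a b : Int => a ≤ b) := by
      have hs := PySem.List.sorted_pairwise l (fun x : Int => x)
      rw [← he] at hs
      exact hs
    rcases l with _ | ⟨a, t⟩
    · exact List.IsChain.singleton _
    · refine List.isChain_cons_cons.mpr ⟨?_, hpair.mpr hp⟩
      have := hnn a (List.mem_cons_self ..); omega

-- ===== VERDICT (by name: the statement is the Claim_ definition above) =====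
theorem check_module_order_py_spec : Claim_equal_check_module_order_py := by
  intro sheet_modules aaa_modules _
  unfold Spec_check_module_order_py check_module_order_py check_module_order_py_alt
  rw [Bool.eq_iff_iff]
  simp only [decide_eq_true_eq]
  rw [loopA_true_iff]
  have hsame : aaaPositionsB aaa_modules = aaaPositionsA aaa_modules := rfl
  rw [hsame]
  apply chain_iff_sorted_eq
  intro x hx
  rw [List.mem_filterMap] at hx
  obtain ⟨m, _, hm⟩ := hx
  exact aaaPositionsA_nonneg aaa_modules m x hm
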